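-- pv_equiv track=rewrite | github.com/Sidd-Pyapali/AfterBuy | backend/app/services/listing_service.py | _detect_category_key
-- ===== SOURCE A (Python) =====
-- _APPAREL_TOKENS = {
--     "jacket", "coat", "hoodie", "hooded", "shirt", "pants", "dress", "sweater",
--     "top", "blouse", "shorts", "skirt", "vest", "pullover", "tee", "cardigan",
--     "blazer", "trench", "parka", "fleece", "windbreaker", "outerwear", "apparel",
--     "clothing", "wear", "sweatshirt", "anorak", "shell", "raincoat",
-- }
--
-- _DRINKWARE_TOKENS = {
--     "bottle", "tumbler", "flask", "mug", "cup", "thermos", "drinkware",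
--     "canteen", "jug", "hydro", "contigo", "yeti", "stanley",
-- }
--
-- _BAGS_TOKENS = {
--     "bag", "backpack", "purse", "tote", "handbag", "wallet", "clutch",
--     "satchel", "duffel", "crossbody", "messenger", "briefcase", "pouch",
-- }
--
-- _FOOTWEAR_TOKENS = {
--     "shoe", "shoes", "boot", "boots", "sneaker", "sneakers", "sandal",
--     "loafer", "heel", "heels", "footwear", "kicks",
-- }
--
-- _ELECTRONICS_TOKENS = {
--     "phone", "laptop", "tablet", "camera", "iphone", "macbook", "ipad",
--     "computer", "electronics", "headphone", "earbuds", "speaker",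
--     "console", "gaming", "keyboard", "mouse", "monitor",
-- }
--
-- def _detect_category_key(item: dict) -> str:
--     tokens: set[str] = set()
--     for field in ("category", "item_type", "title_guess"):
--         val = (item.get(field) or "").lower()
--         tokens.update(val.split())
--
--     if tokens & _APPAREL_TOKENS:
--         return "apparel"
--     if tokens & _DRINKWARE_TOKENS:
--         return "drinkware"
--     if tokens & _BAGS_TOKENS:
--         return "bags"
--     if tokens & _FOOTWEAR_TOKENS:
--         return "footwear"
--     if tokens & _ELECTRONICS_TOKENS:
--         return "electronics"
--     return "general"
-- ===== SOURCE B (Python) =====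
-- # Inverted-index re-implementation: one dict mapping each keyword token to its
-- # category's priority rank; a single pass over the field tokens keeps the
-- # minimum rank, which picks the same category as A's five sequential
-- # set-intersection checks.
--
-- _CATEGORY_KEYWORDS = [
--     ("apparel",
--      "jacket coat hoodie hooded shirt pants dress sweater top blouse shorts "
--      "skirt vest pullover tee cardigan blazer trench parka fleece windbreaker "
--      "outerwear apparel clothing wear sweatshirt anorak shell raincoat"),
--     ("drinkware",
--      "bottle tumbler flask mug cup thermos drinkware canteen jug hydro "
--      "contigo yeti stanley"),
--     ("bags",
--      "bag backpack purse tote handbag wallet clutch satchel duffel crossbody "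
--      "messenger briefcase pouch"),
--     ("footwear",
--      "shoe shoes boot boots sneaker sneakers sandal loafer heel heels "
--      "footwear kicks"),
--     ("electronics",
--      "phone laptop tablet camera iphone macbook ipad computer electronics "
--      "headphone earbuds speaker console gaming keyboard mouse monitor"),
-- ]
--
-- _NO_MATCH = len(_CATEGORY_KEYWORDS)  # rank meaning "no category matched"
--
-- # token -> rank, built back-to-front so a higher-priority category would
-- # overwrite any token it shared with a lower-priority one
-- _TOKEN_RANK = {}
-- for _r, (_name, _words) in reversed(list(enumerate(_CATEGORY_KEYWORDS))):
--     for _tok in _words.split():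
--         _TOKEN_RANK[_tok] = _r
--
--
-- def _detect_category_key(item: dict) -> str:
--     best = _NO_MATCH
--     for field in ("category", "item_type", "title_guess"):
--         for tok in (item.get(field) or "").lower().split():
--             r = _TOKEN_RANK.get(tok, _NO_MATCH)
--             if r < best:
--                 best = r
--     return "general" if best == _NO_MATCH else _CATEGORY_KEYWORDS[best][0]
-- ===== Notes on version B (the rewrite author's own statement) =====
-- stated objective: alternative
-- what changed: Replaces the five sequential set intersections with a module-level inverted index (token -> priority rank, built back-to-front so higher-priority categories win shared tokens) and one pass over the field tokens keeping the minimum rank; no token set is built at all.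
import Mathlib
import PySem

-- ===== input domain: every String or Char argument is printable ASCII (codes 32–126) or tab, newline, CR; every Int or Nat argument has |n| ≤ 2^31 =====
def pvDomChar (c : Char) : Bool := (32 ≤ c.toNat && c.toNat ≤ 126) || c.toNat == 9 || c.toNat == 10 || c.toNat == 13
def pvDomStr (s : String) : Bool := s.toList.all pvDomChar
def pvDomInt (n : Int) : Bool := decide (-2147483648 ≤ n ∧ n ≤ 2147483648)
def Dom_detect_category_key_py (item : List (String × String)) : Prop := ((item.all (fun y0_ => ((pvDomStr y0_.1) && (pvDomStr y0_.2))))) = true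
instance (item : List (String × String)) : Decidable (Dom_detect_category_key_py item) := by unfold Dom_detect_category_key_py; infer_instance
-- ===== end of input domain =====

-- B replaces A's token set + five sequential set-intersection checks by a module-level
-- inverted index (token -> priority rank) and one minimum-rank pass; objective: alternative.

-- ===== PORT A =====
-- module-level set literals of Source A
def pvApparel : PySem.Set String := PySem.Set.ofList
  ["jacket", "coat", "hoodie", "hooded", "shirt", "pants", "dress", "sweater",
   "top", "blouse", "shorts", "skirt", "vest", "pullover", "tee", "cardigan",
   "blazer", "trench", "parka", "fleece", "windbreaker", "outerwear", "apparel",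
   "clothing", "wear", "sweatshirt", "anorak", "shell", "raincoat"]

def pvDrinkware : PySem.Set String := PySem.Set.ofList
  ["bottle", "tumbler", "flask", "mug", "cup", "thermos", "drinkware",
   "canteen", "jug", "hydro", "contigo", "yeti", "stanley"]

def pvBags : PySem.Set String := PySem.Set.ofList
  ["bag", "backpack", "purse", "tote", "handbag", "wallet", "clutch",
   "satchel", "duffel", "crossbody", "messenger", "briefcase", "pouch"]

def pvFootwear : PySem.Set String := PySem.Set.ofList
  ["shoe", "shoes", "boot", "boots", "sneaker", "sneakers", "sandal",
   "loafer", "heel", "heels", "footwear", "kicks"]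

def pvElectronics : PySem.Set String := PySem.Set.ofList
  ["phone", "laptop", "tablet", "camera", "iphone", "macbook", "ipad",
   "computer", "electronics", "headphone", "earbuds", "speaker",
   "console", "gaming", "keyboard", "mouse", "monitor"]

-- A's token-set construction: for each field,
-- val = (item.get(field) or "").lower(); tokens.update(val.split())
-- ('x or ""' is the identity on strings since it only replaces "" by "")
def pvTokens (item : List (String × String)) : PySem.Set String :=
  ["category", "item_type", "title_guess"].foldl
    (fun tokens field =>
      let val := PySem.Str.lower ((PySem.Dict.ofList item).getD field "")
      PySem.Set.update tokens (PySem.Str.split₀ val))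
    PySem.Set.empty

-- 'tokens & S' used as a truth value = the intersection is non-empty
def detect_category_key_py (item : List (String × String)) : String :=
  let tokens := pvTokens item
  if PySem.Set.inter tokens pvApparel ≠ [] then "apparel"
  else if PySem.Set.inter tokens pvDrinkware ≠ [] then "drinkware"
  else if PySem.Set.inter tokens pvBags ≠ [] then "bags"
  else if PySem.Set.inter tokens pvFootwear ≠ [] then "footwear"
  else if PySem.Set.inter tokens pvElectronics ≠ [] then "electronics"
  else "general"

-- ===== PORT B =====
-- Source B's module-level table: (category name, whitespace-joined keyword string)
def pvCatKeywords : List (String × String) :=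
  [("apparel",
    "jacket coat hoodie hooded shirt pants dress sweater top blouse shorts skirt vest pullover tee cardigan blazer trench parka fleece windbreaker outerwear apparel clothing wear sweatshirt anorak shell raincoat"),
   ("drinkware",
    "bottle tumbler flask mug cup thermos drinkware canteen jug hydro contigo yeti stanley"),
   ("bags",
    "bag backpack purse tote handbag wallet clutch satchel duffel crossbody messenger briefcase pouch"),
   ("footwear",
    "shoe shoes boot boots sneaker sneakers sandal loafer heel heels footwear kicks"),
   ("electronics",
    "phone laptop tablet camera iphone macbook ipad computer electronics headphone earbuds speaker console gaming keyboard mouse monitor")]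

-- _TOKEN_RANK: 'for _r, (_name, _words) in reversed(list(enumerate(_CATEGORY_KEYWORDS))):
--                 for _tok in _words.split(): _TOKEN_RANK[_tok] = _r'
def pvTokenRank : PySem.Dict String Int :=
  ((PySem.List.enumerate pvCatKeywords).reverse).foldl
    (fun d p => (PySem.Str.split₀ p.2.2).foldl (fun d tok => d.insert tok p.1) d)
    PySem.Dict.empty

-- the double loop keeping the minimum rank, then indexing the table
-- (_CATEGORY_KEYWORDS[best][0] is in range whenever best ≠ 5, so pyGet? is some there)
def detect_category_key_py_alt (item : List (String × String)) : String :=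
  let best : Int :=
    ["category", "item_type", "title_guess"].foldl
      (fun best field =>
        (PySem.Str.split₀ (PySem.Str.lower ((PySem.Dict.ofList item).getD field ""))).foldl
          (fun best tok =>
            let r := pvTokenRank.getD tok 5
            if r < best then r else best)
          best)
      5
  if best == 5 then "general"
  else ((PySem.List.pyGet? pvCatKeywords best).getD ("", "")).1

-- ===== PRECONDITION & SPEC =====
def Spec_detect_category_key_py (item : List (String × String)) (out : String) : Prop := out = detect_category_key_py_alt item
instance (item : List (String × String)) (out : String) : Decidable (Spec_detect_category_key_py item out) := by unfold Spec_detect_category_key_py; infer_instance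

-- ===== CLAIM =====
def Claim_equal_detect_category_key_py : Prop := ∀ (item : List (String × String)), Dom_detect_category_key_py item → Spec_detect_category_key_py item (detect_category_key_py item)

-- ===== LEMMAS AND PROOFS =====

-- the priority rank of a token, phrased over A's sets (proof-side abbreviation only)
def pvRankFun (t : String) : Int :=
  if t ∈ pvApparel then 0 else if t ∈ pvDrinkware then 1
  else if t ∈ pvBags then 2 else if t ∈ pvFootwear then 3
  else if t ∈ pvElectronics then 4 else 5

-- inserting every element of L with the same value r
theorem pv_get?_insertAll (L : List String) (r : Int) (d : PySem.Dict String Int) (t : String) :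
    (L.foldl (fun d tok => d.insert tok r) d).get? t = if t ∈ L then some r else d.get? t := by
  induction L generalizing d with
  | nil => simp
  | cons a as ih =>
    simp only [List.foldl_cons, ih, PySem.Dict.get?_insert, List.mem_cons]
    by_cases h : t ∈ as <;> by_cases h' : t = a <;> simp [h, h']

set_option maxRecDepth 100000 in
set_option maxHeartbeats 4000000 in
theorem pvTokenRank_getD (t : String) : pvTokenRank.getD t 5 = pvRankFun t := by
  have h : pvTokenRank.get? t =
      if t ∈ PySem.Str.split₀ (pvCatKeywords[0]!).2 then some (0 : Int)
      else if t ∈ PySem.Str.split₀ (pvCatKeywords[1]!).2 then some 1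
      else if t ∈ PySem.Str.split₀ (pvCatKeywords[2]!).2 then some 2
      else if t ∈ PySem.Str.split₀ (pvCatKeywords[3]!).2 then some 3
      else if t ∈ PySem.Str.split₀ (pvCatKeywords[4]!).2 then some 4
      else none := by
    have hl : (PySem.List.enumerate pvCatKeywords).reverse
        = [((4 : Int), pvCatKeywords[4]!), (3, pvCatKeywords[3]!), (2, pvCatKeywords[2]!),
           (1, pvCatKeywords[1]!), (0, pvCatKeywords[0]!)] := by rfl
    unfold pvTokenRank
    rw [hl]
    simp only [List.foldl_cons, List.foldl_nil]
    rw [pv_get?_insertAll, pv_get?_insertAll, pv_get?_insertAll, pv_get?_insertAll,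
      pv_get?_insertAll, PySem.Dict.get?_empty]
  have e0 : PySem.Str.split₀ (pvCatKeywords[0]!).2 = (pvApparel : List String) := by decide
  have e1 : PySem.Str.split₀ (pvCatKeywords[1]!).2 = (pvDrinkware : List String) := by decide
  have e2 : PySem.Str.split₀ (pvCatKeywords[2]!).2 = (pvBags : List String) := by decide
  have e3 : PySem.Str.split₀ (pvCatKeywords[3]!).2 = (pvFootwear : List String) := by decide
  have e4 : PySem.Str.split₀ (pvCatKeywords[4]!).2 = (pvElectronics : List String) := by decide
  rw [PySem.Dict.getD_eq_get?_getD, h, e0, e1, e2, e3, e4]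
  unfold pvRankFun
  split_ifs <;> rfl

theorem pvRankFun_nonneg (t : String) : 0 ≤ pvRankFun t := by
  unfold pvRankFun; split_ifs <;> norm_num

theorem fold_min_le_init (ts : List String) (b : Int) :
    ts.foldl (fun best t => if pvRankFun t < best then pvRankFun t else best) b ≤ b := by
  induction ts generalizing b with
  | nil => simp
  | cons t ts ih =>
    simp only [List.foldl_cons]
    split
    · exact le_trans (ih _) (le_of_lt (by assumption))
    · exact ih b

theorem fold_min_le_of_mem {ts : List String} {t : String} (h : t ∈ ts) (b : Int) :
    ts.foldl (fun best t => if pvRankFun t < best then pvRankFun t else best) b ≤ pvRankFun t := by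
  induction ts generalizing b with
  | nil => cases h
  | cons u ts ih =>
    simp only [List.foldl_cons]
    rcases List.mem_cons.mp h with rfl | h'
    · rcases lt_or_ge (pvRankFun t) b with hlt | hge
      · simp only [if_pos hlt]; exact fold_min_le_init ts _
      · simp only [if_neg (not_lt.mpr hge)]; exact le_trans (fold_min_le_init ts b) hge
    · split <;> exact ih h' _

theorem le_fold_min {ts : List String} {c b : Int} (hb : c ≤ b)
    (h : ∀ t ∈ ts, c ≤ pvRankFun t) :
    c ≤ ts.foldl (fun best t => if pvRankFun t < best then pvRankFun t else best) b := by
  induction ts generalizing b with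
  | nil => simpa using hb
  | cons u ts ih =>
    simp only [List.foldl_cons]
    split
    · exact ih (h u (by simp)) (fun t ht => h t (by simp [ht]))
    · exact ih hb (fun t ht => h t (by simp [ht]))

theorem inter_ne_nil_iff (s t : List String) :
    PySem.Set.inter s t ≠ [] ↔ ∃ x ∈ s, x ∈ t := by
  unfold PySem.Set.inter
  simp [List.filter_eq_nil_iff]

-- core: A's if-chain over any set ts equals B's table lookup at the minimum rank over any
-- list L with the same members as ts
theorem pv_main (ts L : List String) (hmem : ∀ x, x ∈ L ↔ x ∈ ts) :
    (if PySem.Set.inter ts pvApparel ≠ [] then "apparel"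
     else if PySem.Set.inter ts pvDrinkware ≠ [] then "drinkware"
     else if PySem.Set.inter ts pvBags ≠ [] then "bags"
     else if PySem.Set.inter ts pvFootwear ≠ [] then "footwear"
     else if PySem.Set.inter ts pvElectronics ≠ [] then "electronics"
     else "general")
    = (let best := L.foldl (fun best t => if pvRankFun t < best then pvRankFun t else best) 5
       if best == 5 then "general"
       else ((PySem.List.pyGet? pvCatKeywords best).getD ("", "")).1) := by
  by_cases h0 : ∃ x ∈ ts, x ∈ pvApparel
  · rw [if_pos ((inter_ne_nil_iff ts pvApparel).mpr h0)]
    obtain ⟨t, ht, hm⟩ := h0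
    have hr : pvRankFun t = 0 := by rw [pvRankFun, if_pos hm]
    have h1 : L.foldl (fun best t => if pvRankFun t < best then pvRankFun t else best) 5 = 0 :=
      le_antisymm (hr ▸ fold_min_le_of_mem ((hmem t).mpr ht) 5)
        (le_fold_min (by norm_num) (fun u _ => pvRankFun_nonneg u))
    simp only [h1]; rfl
  · rw [if_neg (fun hc => h0 ((inter_ne_nil_iff ts pvApparel).mp hc))]
    by_cases h1 : ∃ x ∈ ts, x ∈ pvDrinkware
    · rw [if_pos ((inter_ne_nil_iff ts pvDrinkware).mpr h1)]
      obtain ⟨t, ht, hm⟩ := h1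
      have hr : pvRankFun t = 1 := by
        rw [pvRankFun, if_neg (fun hc => h0 ⟨t, ht, hc⟩), if_pos hm]
      have hf : L.foldl (fun best t => if pvRankFun t < best then pvRankFun t else best) 5 = 1 :=
        le_antisymm (hr ▸ fold_min_le_of_mem ((hmem t).mpr ht) 5)
          (le_fold_min (by norm_num) (fun u hu => by
            rw [pvRankFun, if_neg (fun hc => h0 ⟨u, (hmem u).mp hu, hc⟩)]
            split_ifs <;> norm_num))
      simp only [hf]; rfl
    · rw [if_neg (fun hc => h1 ((inter_ne_nil_iff ts pvDrinkware).mp hc))]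
      by_cases h2 : ∃ x ∈ ts, x ∈ pvBags
      · rw [if_pos ((inter_ne_nil_iff ts pvBags).mpr h2)]
        obtain ⟨t, ht, hm⟩ := h2
        have hr : pvRankFun t = 2 := by
          rw [pvRankFun, if_neg (fun hc => h0 ⟨t, ht, hc⟩),
            if_neg (fun hc => h1 ⟨t, ht, hc⟩), if_pos hm]
        have hf : L.foldl (fun best t => if pvRankFun t < best then pvRankFun t else best) 5 = 2 :=
          le_antisymm (hr ▸ fold_min_le_of_mem ((hmem t).mpr ht) 5)
            (le_fold_min (by norm_num) (fun u hu => by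
              rw [pvRankFun, if_neg (fun hc => h0 ⟨u, (hmem u).mp hu, hc⟩),
                if_neg (fun hc => h1 ⟨u, (hmem u).mp hu, hc⟩)]
              split_ifs <;> norm_num))
        simp only [hf]; rfl
      · rw [if_neg (fun hc => h2 ((inter_ne_nil_iff ts pvBags).mp hc))]
        by_cases h3 : ∃ x ∈ ts, x ∈ pvFootwear
        · rw [if_pos ((inter_ne_nil_iff ts pvFootwear).mpr h3)]
          obtain ⟨t, ht, hm⟩ := h3
          have hr : pvRankFun t = 3 := by
            rw [pvRankFun, if_neg (fun hc => h0 ⟨t, ht, hc⟩),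
              if_neg (fun hc => h1 ⟨t, ht, hc⟩), if_neg (fun hc => h2 ⟨t, ht, hc⟩), if_pos hm]
          have hf : L.foldl (fun best t => if pvRankFun t < best then pvRankFun t else best) 5 = 3 :=
            le_antisymm (hr ▸ fold_min_le_of_mem ((hmem t).mpr ht) 5)
              (le_fold_min (by norm_num) (fun u hu => by
                rw [pvRankFun, if_neg (fun hc => h0 ⟨u, (hmem u).mp hu, hc⟩),
                  if_neg (fun hc => h1 ⟨u, (hmem u).mp hu, hc⟩),
                  if_neg (fun hc => h2 ⟨u, (hmem u).mp hu, hc⟩)]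
                split_ifs <;> norm_num))
          simp only [hf]; rfl
        · rw [if_neg (fun hc => h3 ((inter_ne_nil_iff ts pvFootwear).mp hc))]
          by_cases h4 : ∃ x ∈ ts, x ∈ pvElectronics
          · rw [if_pos ((inter_ne_nil_iff ts pvElectronics).mpr h4)]
            obtain ⟨t, ht, hm⟩ := h4
            have hr : pvRankFun t = 4 := by
              rw [pvRankFun, if_neg (fun hc => h0 ⟨t, ht, hc⟩),
                if_neg (fun hc => h1 ⟨t, ht, hc⟩), if_neg (fun hc => h2 ⟨t, ht, hc⟩),
                if_neg (fun hc => h3 ⟨t, ht, hc⟩), if_pos hm]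
            have hf : L.foldl (fun best t => if pvRankFun t < best then pvRankFun t else best) 5 = 4 :=
              le_antisymm (hr ▸ fold_min_le_of_mem ((hmem t).mpr ht) 5)
                (le_fold_min (by norm_num) (fun u hu => by
                  rw [pvRankFun, if_neg (fun hc => h0 ⟨u, (hmem u).mp hu, hc⟩),
                    if_neg (fun hc => h1 ⟨u, (hmem u).mp hu, hc⟩),
                    if_neg (fun hc => h2 ⟨u, (hmem u).mp hu, hc⟩),
                    if_neg (fun hc => h3 ⟨u, (hmem u).mp hu, hc⟩)]
                  split_ifs <;> norm_num))
            simp only [hf]; rfl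
          · rw [if_neg (fun hc => h4 ((inter_ne_nil_iff ts pvElectronics).mp hc))]
            have hf : L.foldl (fun best t => if pvRankFun t < best then pvRankFun t else best) 5 = 5 :=
              le_antisymm (fold_min_le_init L 5)
                (le_fold_min (by norm_num) (fun u hu => by
                  rw [pvRankFun, if_neg (fun hc => h0 ⟨u, (hmem u).mp hu, hc⟩),
                    if_neg (fun hc => h1 ⟨u, (hmem u).mp hu, hc⟩),
                    if_neg (fun hc => h2 ⟨u, (hmem u).mp hu, hc⟩),
                    if_neg (fun hc => h3 ⟨u, (hmem u).mp hu, hc⟩),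
                    if_neg (fun hc => h4 ⟨u, (hmem u).mp hu, hc⟩)]))
            simp only [hf]; rfl

-- the flat token list B traverses
def pvFlat (item : List (String × String)) : List String :=
  ["category", "item_type", "title_guess"].flatMap
    (fun field => PySem.Str.split₀ (PySem.Str.lower ((PySem.Dict.ofList item).getD field "")))

theorem pvFlat_mem_tokens (item : List (String × String)) (x : String) :
    x ∈ pvFlat item ↔ x ∈ pvTokens item := by
  simp only [pvFlat, pvTokens, List.flatMap_cons, List.flatMap_nil, List.foldl_cons,
    List.foldl_nil, List.append_nil, List.mem_append, PySem.Set.mem_update]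
  simp [PySem.Set.empty, or_assoc]

theorem alt_eq_flat_fold (item : List (String × String)) :
    detect_category_key_py_alt item
      = (let best := (pvFlat item).foldl
            (fun best t => if pvRankFun t < best then pvRankFun t else best) 5
         if best == 5 then "general"
         else ((PySem.List.pyGet? pvCatKeywords best).getD ("", "")).1) := by
  unfold detect_category_key_py_alt pvFlat
  simp only [List.flatMap_cons, List.flatMap_nil, List.foldl_cons, List.foldl_nil,
    List.append_nil, List.foldl_append, pvTokenRank_getD]

-- ===== VERDICT =====
theorem detect_category_key_py_spec : Claim_equal_detect_category_key_py := by
  intro item _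
  unfold Spec_detect_category_key_py detect_category_key_py
  rw [alt_eq_flat_fold]
  exact pv_main (pvTokens item) (pvFlat item) (pvFlat_mem_tokens item)
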